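-- pv_equiv track=rewrite | github.com/agent-fox-dev/agent-fox-v3 | agent_fox/graph/critical_path.py | _backtrack_paths
-- ===== SOURCE A (Python) =====
-- def _backtrack_paths(
--     node: str,
--     edges: dict[str, list[str]],
--     earliest_finish: dict[str, int],
--     duration_hints: dict[str, int],
-- ) -> list[list[str]]:
--     """Backtrack from a node to find all critical paths ending at it.
--
--     A predecessor is on the critical path if its earliest_finish equals
--     this node's earliest_finish minus this node's duration.
--     """
--     dur = duration_hints.get(node, 0)
--     expected_pred_finish = earliest_finish.get(node, 0) - dur
--
--     preds = edges.get(node, [])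
--     critical_preds = [
--         p for p in preds if earliest_finish.get(p, 0) == expected_pred_finish
--     ]
--
--     if not critical_preds:
--         # This is a source node on the critical path
--         return [[node]]
--
--     paths: list[list[str]] = []
--     for pred in sorted(critical_preds):
--         sub_paths = _backtrack_paths(pred, edges, earliest_finish, duration_hints)
--         for sp in sub_paths:
--             paths.append(sp + [node])
--
--     return paths
-- ===== SOURCE B (Python) =====
-- def _backtrack_paths(
--     node: str,
--     edges: dict[str, list[str]],
--     earliest_finish: dict[str, int],
--     duration_hints: dict[str, int],
-- ) -> list[list[str]]:
--     """Memoized DP over the DAG: each node's critical-path list is computed once."""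
--     memo: dict[str, list[list[str]]] = {}
--
--     def solve(n: str) -> list[list[str]]:
--         cached = memo.get(n)
--         if cached is not None:
--             return cached
--         expected = earliest_finish.get(n, 0) - duration_hints.get(n, 0)
--         crit = sorted(
--             p for p in edges.get(n, []) if earliest_finish.get(p, 0) == expected
--         )
--         if not crit:
--             result = [[n]]
--         else:
--             result = [sp + [n] for p in crit for sp in solve(p)]
--         memo[n] = result
--         return result
--
--     return solve(node)
-- ===== Notes on version B (the rewrite author's own statement) =====
-- stated objective: alternative
-- what changed: B replaces A's plain recursion by memoized DP over the DAG: a dict caches each node's critical-path list, so shared predecessors are solved once instead of once per occurrence in the recursion tree.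
import Mathlib
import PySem

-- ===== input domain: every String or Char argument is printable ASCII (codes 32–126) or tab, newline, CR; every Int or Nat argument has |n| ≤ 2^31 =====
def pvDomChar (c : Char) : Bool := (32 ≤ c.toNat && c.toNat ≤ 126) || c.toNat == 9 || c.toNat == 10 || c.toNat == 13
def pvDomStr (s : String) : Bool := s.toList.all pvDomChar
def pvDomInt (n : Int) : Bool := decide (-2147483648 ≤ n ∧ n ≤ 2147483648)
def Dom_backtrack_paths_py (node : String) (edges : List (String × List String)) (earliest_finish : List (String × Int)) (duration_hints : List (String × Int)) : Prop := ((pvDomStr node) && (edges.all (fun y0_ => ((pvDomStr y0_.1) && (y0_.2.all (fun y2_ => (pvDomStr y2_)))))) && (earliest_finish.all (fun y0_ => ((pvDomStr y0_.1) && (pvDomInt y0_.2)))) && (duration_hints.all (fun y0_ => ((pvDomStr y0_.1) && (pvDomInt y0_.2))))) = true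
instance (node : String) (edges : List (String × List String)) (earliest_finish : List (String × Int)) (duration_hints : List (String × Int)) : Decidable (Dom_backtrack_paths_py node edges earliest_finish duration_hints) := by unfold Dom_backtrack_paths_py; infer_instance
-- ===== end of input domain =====

-- B memoizes the per-node path lists (DP over the DAG), so each node's critical paths are
-- computed once instead of once per occurrence in A's recursion tree (objective: alternative).

-- ===== PORT A =====
-- the first four lines of A's body (dur / expected_pred_finish / preds / critical_preds)
def pvCritPreds (node : String) (edges : List (String × List String)) (earliest_finish : List (String × Int)) (duration_hints : List (String × Int)) : List String :=
  let dur := (PySem.Dict.mk duration_hints).getD node 0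
  let expected_pred_finish := (PySem.Dict.mk earliest_finish).getD node 0 - dur
  let preds := (PySem.Dict.mk edges).getD node []
  preds.filter (fun p => (PySem.Dict.mk earliest_finish).getD p 0 == expected_pred_finish)

-- A's recursion with a fuel counter as termination device; `none` marks fuel exhaustion
-- (Python's unbounded recursion / RecursionError), which Pre_ makes unreachable.
def aGo (edges : List (String × List String)) (earliest_finish : List (String × Int)) (duration_hints : List (String × Int)) : Nat → String → Option (List (List String))
  | 0, _ => none
  | Nat.succ f, node =>
    let critical_preds := pvCritPreds node edges earliest_finish duration_hints
    if critical_preds.isEmpty then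
      some [[node]]
    else
      (PySem.List.sorted critical_preds (fun p => p)).foldl
        (fun paths pred =>
          paths.bind (fun acc =>
            (aGo edges earliest_finish duration_hints f pred).map
              (fun sub_paths => acc ++ sub_paths.map (fun sp => sp ++ [node]))))
        (some [])

def backtrack_paths_py (node : String) (edges : List (String × List String)) (earliest_finish : List (String × Int)) (duration_hints : List (String × Int)) : List (List String) :=
  (aGo edges earliest_finish duration_hints (edges.length + 1) node).getD []

-- ===== PORT B =====
-- B's `crit = sorted(p for p in edges.get(n, []) if ...)`
def bCritSorted (n : String) (edges : List (String × List String)) (earliest_finish : List (String × Int)) (duration_hints : List (String × Int)) : List String :=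
  PySem.List.sorted
    (((PySem.Dict.mk edges).getD n []).filter
      (fun p => (PySem.Dict.mk earliest_finish).getD p 0 ==
        (PySem.Dict.mk earliest_finish).getD n 0 - (PySem.Dict.mk duration_hints).getD n 0))
    (fun p => p)

-- B's memoized `solve`, threading the memo dict; same fuel device as A's port
def bSolve (edges : List (String × List String)) (earliest_finish : List (String × Int)) (duration_hints : List (String × Int)) : Nat → String → PySem.Dict String (List (List String)) → Option (List (List String)) × PySem.Dict String (List (List String))
  | 0, _, memo => (none, memo)
  | Nat.succ f, n, memo =>
    match memo.get? n with
    | some cached => (some cached, memo)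
    | none =>
      let crit := bCritSorted n edges earliest_finish duration_hints
      if crit.isEmpty then
        (some [[n]], memo.insert n [[n]])
      else
        match crit.foldl
          (fun st p =>
            match st with
            | (none, m) => (none, m)
            | (some xs, m) =>
              match bSolve edges earliest_finish duration_hints f p m with
              | (some rs, m') => (some (xs ++ rs.map (fun sp => sp ++ [n])), m')
              | (none, m') => (none, m'))
          (some ([] : List (List String)), memo) with
        | (some result, m') => (some result, m'.insert n result)
        | (none, m') => (none, m')

def backtrack_paths_py_alt (node : String) (edges : List (String × List String)) (earliest_finish : List (String × Int)) (duration_hints : List (String × Int)) : List (List String) :=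
  ((bSolve edges earliest_finish duration_hints (edges.length + 1) node PySem.Dict.empty).1).getD []

-- ===== PRECONDITION & SPEC =====
-- pvStep/pvFrontier are plain graph reachability in the INPUT's critical-predecessor
-- relation (the set of nodes k steps away), not a run of either port: they build no paths
-- and carry no algorithm state — Pre_ below is the standard acyclicity-from-node condition.
def pvStep (edges : List (String × List String)) (earliest_finish : List (String × Int)) (duration_hints : List (String × Int)) (S : List String) : List String :=
  PySem.List.dedup (S.flatMap (fun n => pvCritPreds n edges earliest_finish duration_hints))

def pvFrontier (edges : List (String × List String)) (earliest_finish : List (String × Int)) (duration_hints : List (String × Int)) (node : String) : Nat → List String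
  | 0 => [node]
  | Nat.succ k => pvStep edges earliest_finish duration_hints (pvFrontier edges earliest_finish duration_hints node k)

-- Pre_ excludes exactly the inputs on which A raises RecursionError: a critical-predecessor
-- chain of length edges.length+1 from node forces (by pigeonhole over the edge keys) a
-- reachable cycle, on which A's recursion never returns; on every other input A returns.
def Pre_backtrack_paths_py (node : String) (edges : List (String × List String)) (earliest_finish : List (String × Int)) (duration_hints : List (String × Int)) : Prop :=
  pvFrontier edges earliest_finish duration_hints node (edges.length + 1) = []

instance (node : String) (edges : List (String × List String)) (earliest_finish : List (String × Int)) (duration_hints : List (String × Int)) : Decidable (Pre_backtrack_paths_py node edges earliest_finish duration_hints) := by unfold Pre_backtrack_paths_py; infer_instance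

def pvWitness_backtrack_paths_py : String × (List (String × List String)) × (List (String × Int)) × (List (String × Int)) :=
  ("b", [("b", ["a"])], [("a", 0), ("b", 3)], [("b", 3)])

def Spec_backtrack_paths_py (node : String) (edges : List (String × List String)) (earliest_finish : List (String × Int)) (duration_hints : List (String × Int)) (out : List (List String)) : Prop := out = backtrack_paths_py_alt node edges earliest_finish duration_hints
instance (node : String) (edges : List (String × List String)) (earliest_finish : List (String × Int)) (duration_hints : List (String × Int)) (out : List (List String)) : Decidable (Spec_backtrack_paths_py node edges earliest_finish duration_hints out) := by unfold Spec_backtrack_paths_py; infer_instance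

-- ===== CLAIM (what is proved, stated in full; the proofs are below) =====
def Claim_equal_backtrack_paths_py : Prop := ∀ (node : String) (edges : List (String × List String)) (earliest_finish : List (String × Int)) (duration_hints : List (String × Int)), Dom_backtrack_paths_py node edges earliest_finish duration_hints → Pre_backtrack_paths_py node edges earliest_finish duration_hints → Spec_backtrack_paths_py node edges earliest_finish duration_hints (backtrack_paths_py node edges earliest_finish duration_hints)

-- ===== LEMMAS AND PROOFS =====

theorem pvWitness_ok : Dom_backtrack_paths_py (pvWitness_backtrack_paths_py.1) (pvWitness_backtrack_paths_py.2.1) (pvWitness_backtrack_paths_py.2.2.1) (pvWitness_backtrack_paths_py.2.2.2) ∧ Pre_backtrack_paths_py (pvWitness_backtrack_paths_py.1) (pvWitness_backtrack_paths_py.2.1) (pvWitness_backtrack_paths_py.2.2.1) (pvWitness_backtrack_paths_py.2.2.2) := by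
  decide

-- A's inner fold propagates `none`
theorem aFold_none (edges : List (String × List String)) (earliest_finish : List (String × Int)) (duration_hints : List (String × Int)) (f : Nat) (node : String) (l : List String) :
    l.foldl
      (fun paths pred =>
        paths.bind (fun acc =>
          (aGo edges earliest_finish duration_hints f pred).map
            (fun sub_paths => acc ++ sub_paths.map (fun sp => sp ++ [node]))))
      none = none := by
  induction l with
  | nil => rfl
  | cons p l ih => simpa using ih

-- fold counterpart of fuel monotonicity (takes the fuel induction hypothesis)
theorem aFold_mono (edges : List (String × List String)) (earliest_finish : List (String × Int)) (duration_hints : List (String × Int)) (f f'' : Nat) (node : String)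
    (ihf : ∀ n r, aGo edges earliest_finish duration_hints f n = some r → aGo edges earliest_finish duration_hints f'' n = some r) :
    ∀ (l : List String) (acc : Option (List (List String))) (r : List (List String)),
      l.foldl
        (fun paths pred =>
          paths.bind (fun acc =>
            (aGo edges earliest_finish duration_hints f pred).map
              (fun sub_paths => acc ++ sub_paths.map (fun sp => sp ++ [node]))))
        acc = some r →
      l.foldl
        (fun paths pred =>
          paths.bind (fun acc =>
            (aGo edges earliest_finish duration_hints f'' pred).map
              (fun sub_paths => acc ++ sub_paths.map (fun sp => sp ++ [node]))))
        acc = some r := by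
  intro l
  induction l with
  | nil => intro acc r h; simpa using h
  | cons p l ih =>
    intro acc r h
    cases acc with
    | none =>
      simp only [List.foldl_cons, Option.bind_none] at h
      rw [aFold_none] at h
      exact absurd h (by simp)
    | some xs =>
      cases hp : aGo edges earliest_finish duration_hints f p with
      | none =>
        simp only [List.foldl_cons, hp, Option.bind_some, Option.map_none] at h
        rw [aFold_none] at h
        exact absurd h (by simp)
      | some rs =>
        simp only [List.foldl_cons, hp, Option.bind_some, Option.map_some] at h
        simp only [List.foldl_cons, ihf p rs hp, Option.bind_some, Option.map_some]
        exact ih _ r h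

theorem aGo_mono (edges : List (String × List String)) (earliest_finish : List (String × Int)) (duration_hints : List (String × Int)) :
    ∀ (f : Nat) (n : String) (r : List (List String)), aGo edges earliest_finish duration_hints f n = some r →
      ∀ f', f ≤ f' → aGo edges earliest_finish duration_hints f' n = some r := by
  intro f
  induction f with
  | zero => intro n r h; simp [aGo] at h
  | succ f ih =>
    intro n r h f' hf'
    obtain ⟨f'', rfl⟩ : ∃ f'', f' = f'' + 1 := ⟨f' - 1, by omega⟩
    have hff : f ≤ f'' := by omega
    simp only [aGo] at h ⊢
    cases hc : (pvCritPreds n edges earliest_finish duration_hints).isEmpty with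
    | true => simpa [hc] using h
    | false =>
      simp only [hc, Bool.false_eq_true, if_false] at h ⊢
      exact aFold_mono edges earliest_finish duration_hints f f'' n
        (fun m s hm => ih m s hm f'' hff) _ _ r h

-- the frontier of a critical predecessor is inside the next frontier of the node
theorem frontier_subset (edges : List (String × List String)) (earliest_finish : List (String × Int)) (duration_hints : List (String × Int)) (n p : String)
    (hp : p ∈ pvCritPreds n edges earliest_finish duration_hints) :
    ∀ (k : Nat), ∀ x ∈ pvFrontier edges earliest_finish duration_hints p k,
      x ∈ pvFrontier edges earliest_finish duration_hints n (k + 1) := by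
  intro k
  induction k with
  | zero =>
    intro x hx
    simp only [pvFrontier, List.mem_singleton] at hx
    subst hx
    simp only [pvFrontier, pvStep, PySem.List.mem_dedup, List.mem_flatMap]
    exact ⟨n, by simp, hp⟩
  | succ k ih =>
    intro x hx
    rw [show pvFrontier edges earliest_finish duration_hints p (k + 1) = pvStep edges earliest_finish duration_hints (pvFrontier edges earliest_finish duration_hints p k) from rfl] at hx
    rw [show pvFrontier edges earliest_finish duration_hints n (k + 1 + 1) = pvStep edges earliest_finish duration_hints (pvFrontier edges earliest_finish duration_hints n (k + 1)) from rfl]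
    simp only [pvStep, PySem.List.mem_dedup, List.mem_flatMap] at hx ⊢
    obtain ⟨m, hm, hxm⟩ := hx
    exact ⟨m, ih m hm, hxm⟩

-- A's fold returns some when every element's recursion returns some
theorem aFold_total (edges : List (String × List String)) (earliest_finish : List (String × Int)) (duration_hints : List (String × Int)) (f : Nat) (node : String) :
    ∀ (l : List String), (∀ p ∈ l, ∃ rp, aGo edges earliest_finish duration_hints f p = some rp) →
      ∀ (xs : List (List String)), ∃ r,
        l.foldl
          (fun paths pred =>
            paths.bind (fun acc =>
              (aGo edges earliest_finish duration_hints f pred).map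
                (fun sub_paths => acc ++ sub_paths.map (fun sp => sp ++ [node]))))
          (some xs) = some r := by
  intro l
  induction l with
  | nil => intro _ xs; exact ⟨xs, rfl⟩
  | cons p l ih =>
    intro hall xs
    obtain ⟨rp, hrp⟩ := hall p (by simp)
    simp only [List.foldl_cons, hrp, Option.bind_some, Option.map_some]
    exact ih (fun q hq => hall q (by simp [hq])) _

theorem aGo_total (edges : List (String × List String)) (earliest_finish : List (String × Int)) (duration_hints : List (String × Int)) :
    ∀ (f : Nat) (n : String), pvFrontier edges earliest_finish duration_hints n f = [] →
      ∃ r, aGo edges earliest_finish duration_hints f n = some r := by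
  intro f
  induction f with
  | zero => intro n h; simp [pvFrontier] at h
  | succ f ih =>
    intro n h
    have hpred : ∀ p ∈ pvCritPreds n edges earliest_finish duration_hints,
        pvFrontier edges earliest_finish duration_hints p f = [] := by
      intro p hp
      rw [List.eq_nil_iff_forall_not_mem]
      intro x hx
      have := frontier_subset edges earliest_finish duration_hints n p hp f x hx
      rw [h] at this
      exact absurd this (by simp)
    cases hc : (pvCritPreds n edges earliest_finish duration_hints).isEmpty with
    | true => exact ⟨[[n]], by simp [aGo, hc]⟩
    | false =>
      have hall : ∀ p ∈ PySem.List.sorted (pvCritPreds n edges earliest_finish duration_hints) (fun p => p),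
          ∃ rp, aGo edges earliest_finish duration_hints f p = some rp := by
        intro p hp
        exact ih p (hpred p (((PySem.List.mem_sorted _ _ _ _).1 hp)))
      obtain ⟨r, hr⟩ := aFold_total edges earliest_finish duration_hints f n _ hall []
      exact ⟨r, by simp only [aGo, hc, Bool.false_eq_true, if_false]; exact hr⟩

-- every memo entry is a value of A's recursion (at some fuel)
def MemoOK (edges : List (String × List String)) (earliest_finish : List (String × Int)) (duration_hints : List (String × Int)) (memo : PySem.Dict String (List (List String))) : Prop :=
  ∀ k v, memo.get? k = some v → ∃ g, aGo edges earliest_finish duration_hints g k = some v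

-- inserting a value of A's recursion preserves memo correctness
theorem MemoOK_insert (edges : List (String × List String)) (earliest_finish : List (String × Int)) (duration_hints : List (String × Int)) (memo : PySem.Dict String (List (List String))) (n : String) (v : List (List String))
    (h : MemoOK edges earliest_finish duration_hints memo)
    (hv : ∃ g, aGo edges earliest_finish duration_hints g n = some v) :
    MemoOK edges earliest_finish duration_hints (memo.insert n v) := by
  intro k w hk
  by_cases hkn : k = n
  · rw [PySem.Dict.get?_insert, if_pos hkn] at hk
    injection hk with hk
    subst hk
    exact hkn ▸ hv
  · rw [PySem.Dict.get?_insert, if_neg hkn] at hk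
    exact h k w hk

-- B's fold over the critical predecessors tracks A's fold (given the fuel induction hypothesis)
theorem bFold_correct (edges : List (String × List String)) (earliest_finish : List (String × Int)) (duration_hints : List (String × Int)) (f : Nat) (node : String)
    (ihf : ∀ (n : String) (r : List (List String)) (memo : PySem.Dict String (List (List String))),
      MemoOK edges earliest_finish duration_hints memo →
      aGo edges earliest_finish duration_hints f n = some r →
      (bSolve edges earliest_finish duration_hints f n memo).1 = some r ∧
        MemoOK edges earliest_finish duration_hints (bSolve edges earliest_finish duration_hints f n memo).2) :
    ∀ (l : List String) (xs : List (List String)) (r : List (List String)) (memo : PySem.Dict String (List (List String))),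
      MemoOK edges earliest_finish duration_hints memo →
      l.foldl
        (fun paths pred =>
          paths.bind (fun acc =>
            (aGo edges earliest_finish duration_hints f pred).map
              (fun sub_paths => acc ++ sub_paths.map (fun sp => sp ++ [node]))))
        (some xs) = some r →
      (l.foldl
        (fun st p =>
          match st with
          | (none, m) => (none, m)
          | (some xs, m) =>
            match bSolve edges earliest_finish duration_hints f p m with
            | (some rs, m') => (some (xs ++ rs.map (fun sp => sp ++ [node])), m')
            | (none, m') => (none, m'))
        (some xs, memo)).1 = some r ∧
        MemoOK edges earliest_finish duration_hints
          (l.foldl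
            (fun st p =>
              match st with
              | (none, m) => (none, m)
              | (some xs, m) =>
                match bSolve edges earliest_finish duration_hints f p m with
                | (some rs, m') => (some (xs ++ rs.map (fun sp => sp ++ [node])), m')
                | (none, m') => (none, m'))
            (some xs, memo)).2 := by
  intro l
  induction l with
  | nil =>
    intro xs r memo hm h
    exact ⟨h, hm⟩
  | cons p l ihl =>
    intro xs r memo hm h
    cases hp : aGo edges earliest_finish duration_hints f p with
    | none =>
      simp only [List.foldl_cons, hp, Option.bind_some, Option.map_none] at h
      rw [aFold_none] at h
      exact absurd h (by simp)
    | some rs =>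
      simp only [List.foldl_cons, hp, Option.bind_some, Option.map_some] at h
      obtain ⟨h1, h2⟩ := ihf p rs memo hm hp
      rcases hbs : bSolve edges earliest_finish duration_hints f p memo with ⟨o, m'⟩
      rw [hbs] at h1 h2
      simp only at h1 h2
      subst h1
      simp only [List.foldl_cons, hbs]
      exact ihl _ r m' h2 h

-- B's memoized recursion returns exactly A's value and keeps the memo correct
theorem bSolve_correct (edges : List (String × List String)) (earliest_finish : List (String × Int)) (duration_hints : List (String × Int)) :
    ∀ (f : Nat) (n : String) (r : List (List String)) (memo : PySem.Dict String (List (List String))),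
      MemoOK edges earliest_finish duration_hints memo →
      aGo edges earliest_finish duration_hints f n = some r →
      (bSolve edges earliest_finish duration_hints f n memo).1 = some r ∧
        MemoOK edges earliest_finish duration_hints (bSolve edges earliest_finish duration_hints f n memo).2 := by
  intro f
  induction f with
  | zero => intro n r memo _ hA; simp [aGo] at hA
  | succ f ih =>
    intro n r memo hm hA
    simp only [bSolve]
    cases hget : memo.get? n with
    | some v =>
      obtain ⟨g, hg⟩ := hm n v hget
      have h1 := aGo_mono edges earliest_finish duration_hints (f + 1) n r hA (max (f + 1) g) (le_max_left _ _)
      have h2 := aGo_mono edges earliest_finish duration_hints g n v hg (max (f + 1) g) (le_max_right _ _)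
      rw [h1] at h2
      injection h2 with h2
      subst h2
      exact ⟨rfl, hm⟩
    | none =>
      have hA' := hA
      simp only [aGo] at hA'
      have hbc : bCritSorted n edges earliest_finish duration_hints = PySem.List.sorted (pvCritPreds n edges earliest_finish duration_hints) (fun p => p) := rfl
      cases hc : (pvCritPreds n edges earliest_finish duration_hints).isEmpty with
      | true =>
        rw [hc, if_pos rfl] at hA'
        injection hA' with hA'
        have hbce : (bCritSorted n edges earliest_finish duration_hints).isEmpty = true := by
          rw [hbc, List.isEmpty_iff]
          exact (PySem.List.sorted_eq_nil_iff _ _ _).2 (List.isEmpty_iff.mp hc)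
        rw [if_pos hbce]
        exact ⟨by rw [hA'], MemoOK_insert edges earliest_finish duration_hints memo n [[n]] hm ⟨f + 1, by rw [hA, ← hA']⟩⟩
      | false =>
        rw [hc] at hA'
        simp only [Bool.false_eq_true, if_false] at hA'
        obtain ⟨h1, h2⟩ := bFold_correct edges earliest_finish duration_hints f n
          (fun m s mm hmm hgo => ih m s mm hmm hgo)
          (PySem.List.sorted (pvCritPreds n edges earliest_finish duration_hints) (fun p => p)) [] r memo hm hA'
        have hbce : ¬ ((bCritSorted n edges earliest_finish duration_hints).isEmpty = true) := by
          rw [hbc]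
          simp only [List.isEmpty_iff]
          intro hnil
          rw [(PySem.List.sorted_eq_nil_iff _ _ _).1 hnil] at hc
          simp at hc
        rw [if_neg hbce]
        simp only [hbc]
        refine ⟨?_, ?_⟩
        · split
          next result m' heq =>
            rw [heq] at h1
            simpa using h1
          next m' heq =>
            rw [heq] at h1
            simp at h1
        · split
          next result m' heq =>
            rw [heq] at h1 h2
            simp only at h1 h2
            injection h1 with h1
            subst h1
            exact MemoOK_insert edges earliest_finish duration_hints m' n result h2 ⟨f + 1, hA⟩
          next m' heq =>
            rw [heq] at h1
            simp at h1

-- ===== VERDICT (by name: the statement is the Claim_ definition above) =====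
theorem backtrack_paths_py_spec : Claim_equal_backtrack_paths_py := by
  intro node edges ef dh _hdom hpre
  unfold Pre_backtrack_paths_py at hpre
  obtain ⟨r, hr⟩ := aGo_total edges ef dh (edges.length + 1) node hpre
  have hmemo : MemoOK edges ef dh PySem.Dict.empty := by
    intro k v hk
    simp [PySem.Dict.get?_empty] at hk
  obtain ⟨hb, _⟩ := bSolve_correct edges ef dh (edges.length + 1) node r PySem.Dict.empty hmemo hr
  unfold Spec_backtrack_paths_py backtrack_paths_py backtrack_paths_py_alt
  rw [hr, hb]
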